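-- pv_equiv track=rewrite | github.com/KrypticCoconut/PyNoteTaker | classes/prompt.py | unterminatedstring
-- ===== SOURCE A (Python) =====
-- def unterminatedstring(s):
--     unterminated = False
--     string = None
--     uindex = None
--     for i, c in enumerate(s):
--         if(c in "'\""):
--             if(c == string):
--                 unterminated = False
--                 string = None
--                 uindex = None
--             elif(string == None):
--                 unterminated = True
--                 string = c
--                 uindex = i
--     if(unterminated):
--         return 'Unterminated quote: {}'.format(s[:uindex+1] + "<")
-- ===== SOURCE B (Python) =====
-- def _match(qs):
--     # first unmatched opening quote position in the quote list, or None
--     if not qs: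
--         return None
--     p, ch = qs[0]
--     rest = qs[1:]
--     for k in range(len(rest)):
--         if rest[k][1] == ch:
--             return _match(rest[k + 1:])
--     return p
--
--
-- def unterminatedstring(s):
--     qs = [(i, c) for i, c in enumerate(s) if c in "'\""]
--     p = _match(qs)
--     if p is not None:
--         return 'Unterminated quote: {}'.format(s[:p + 1] + "<")
-- ===== Notes on version B (the rewrite author's own statement) =====
-- stated objective: alternative
-- what changed: B replaces A's per-character three-variable state machine with a two-phase decomposition: extract the list of quote positions once, then recursively match each opening quote with the next occurrence of the same character, reporting the first open quote with no match.
import Mathlib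
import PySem

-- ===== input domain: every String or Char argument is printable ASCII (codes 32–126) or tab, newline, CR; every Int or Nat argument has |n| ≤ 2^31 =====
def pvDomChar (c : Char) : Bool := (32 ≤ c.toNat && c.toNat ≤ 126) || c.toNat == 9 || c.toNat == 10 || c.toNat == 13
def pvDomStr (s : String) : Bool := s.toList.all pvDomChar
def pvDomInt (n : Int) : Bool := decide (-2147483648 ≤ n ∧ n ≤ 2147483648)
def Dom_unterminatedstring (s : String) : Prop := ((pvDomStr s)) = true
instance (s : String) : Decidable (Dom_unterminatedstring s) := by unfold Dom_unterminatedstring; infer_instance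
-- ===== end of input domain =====

-- B replaces A's per-character three-variable state machine by extracting the quote positions once
-- and matching open/close pairs recursively on that list (objective: alternative decomposition).

-- ===== PORT A =====
-- loop body of A: state (unterminated, string, uindex)
def stepA (st : Bool × Option Char × Option Int) (ic : Int × Char) : Bool × Option Char × Option Int :=
  let (_, string, _) := st
  let (i, c) := ic
  if c == '\'' || c == '"' then            -- c in "'\""
    if some c == string then (false, none, none)
    else if string == none then (true, some c, some i)
    else st
  else st

def unterminatedstring (s : String) : Option String :=
  let r := (PySem.List.enumerate s.toList 0).foldl stepA (false, none, none)
  if r.1 then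
    -- 'Unterminated quote: {}'.format(s[:uindex+1] + "<");  uindex is always set when unterminated
    some (String.ofList ("Unterminated quote: ".toList ++
      PySem.Chars.slice s.toList none (some ((r.2.2.getD 0) + 1)) ++ ['<']))
  else none

-- ===== PORT B =====
-- the inner for-loop of _match: suffix rest[k+1:] after the first k with rest[k][1] == ch, or none
def findClose (ch : Char) : List (Int × Char) → Option (List (Int × Char))
  | [] => none
  | (_, c) :: t => if c == ch then some t else findClose ch t

theorem findClose_length {ch : Char} {qs t : List (Int × Char)}
    (h : findClose ch qs = some t) : t.length ≤ qs.length := by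
  induction qs with
  | nil => simp [findClose] at h
  | cons x rest ih =>
    simp only [findClose] at h
    split at h
    · cases h; simp
    · exact Nat.le_succ_of_le (ih h)

-- _match: position of the first unmatched opening quote, or none
def matchQs : List (Int × Char) → Option Int
  | [] => none
  | (p, ch) :: rest =>
    match h : findClose ch rest with
    | some t => matchQs t
    | none => some p
termination_by qs => qs.length
decreasing_by exact Nat.lt_succ_of_le (findClose_length h)

def unterminatedstring_alt (s : String) : Option String :=
  let qs := (PySem.List.enumerate s.toList 0).filter (fun ic => ic.2 == '\'' || ic.2 == '"')
  match matchQs qs with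
  | some p => some (String.ofList ("Unterminated quote: ".toList ++
      PySem.Chars.slice s.toList none (some (p + 1)) ++ ['<']))
  | none => none

-- ===== PRECONDITION & SPEC =====
def Spec_unterminatedstring (s : String) (out : Option String) : Prop := out = unterminatedstring_alt s
instance (s : String) (out : Option String) : Decidable (Spec_unterminatedstring s out) := by unfold Spec_unterminatedstring; infer_instance

-- ===== CLAIM (what is proved, stated in full; the proofs are below) =====
def Claim_equal_unterminatedstring : Prop := ∀ (s : String), Dom_unterminatedstring s → Spec_unterminatedstring s (unterminatedstring s)

-- ===== LEMMAS AND PROOFS =====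

-- A's step is the identity on non-quote characters, so the fold over all characters
-- equals the fold over the quote sublist B extracts.
theorem foldl_stepA_filter (l : List (Int × Char)) (st : Bool × Option Char × Option Int) :
    l.foldl stepA st = (l.filter (fun ic => ic.2 == '\'' || ic.2 == '"')).foldl stepA st := by
  induction l generalizing st with
  | nil => rfl
  | cons x rest ih =>
    obtain ⟨i, c⟩ := x
    by_cases hc : (c == '\'' || c == '"') = true
    · simp [hc, List.foldl_cons, ih]
    · simp only [List.filter_cons]
      simp only [List.foldl_cons]
      rw [show stepA st (i, c) = st by simp [stepA, hc]]
      simp [hc, ih]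

-- fold from an open-quote state versus findClose
theorem foldl_stepA_open (rest : List (Int × Char)) (p : Int) (ch : Char)
    (hq : ∀ x ∈ rest, (x.2 == '\'' || x.2 == '"') = true) :
    rest.foldl stepA (true, some ch, some p) =
      (match findClose ch rest with
       | none => (true, some ch, some p)
       | some t => t.foldl stepA (false, none, none)) := by
  induction rest with
  | nil => rfl
  | cons x t ih =>
    obtain ⟨j, c⟩ := x
    have hc : (c == '\'' || c == '"') = true := hq (j, c) (by simp)
    by_cases hcc : c = ch
    · subst hcc
      simp [List.foldl_cons, stepA, hc, findClose]
    · have : stepA (true, some ch, some p) (j, c) = (true, some ch, some p) := by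
        simp [stepA, hc, hcc]
      rw [List.foldl_cons, this, ih (fun x hx => hq x (by simp [hx]))]
      simp [findClose, hcc]

theorem mem_of_findClose {ch : Char} {qs t : List (Int × Char)}
    (h : findClose ch qs = some t) : ∀ x ∈ t, x ∈ qs := by
  induction qs with
  | nil => simp [findClose] at h
  | cons y r ih =>
    simp only [findClose] at h
    split at h
    · cases h; intro x hx; simp [hx]
    · intro x hx; simp [ih h x hx]

-- characterisation of A's fold on the quote list by B's matcher
theorem foldl_stepA_matchQs (qs : List (Int × Char))
    (hq : ∀ x ∈ qs, (x.2 == '\'' || x.2 == '"') = true) :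
    (matchQs qs = none → qs.foldl stepA (false, none, none) = (false, none, none)) ∧
    (∀ p, matchQs qs = some p →
      ∃ ch, qs.foldl stepA (false, none, none) = (true, some ch, some p)) := by
  induction qs using matchQs.induct with
  | case1 => simp [matchQs]
  | case2 p ch rest t h ih =>
    have hc : (ch == '\'' || ch == '"') = true := hq (p, ch) (by simp)
    have hstep : stepA (false, none, none) (p, ch) = (true, some ch, some p) := by
      simp [stepA, hc]
    have hrest : ∀ x ∈ rest, (x.2 == '\'' || x.2 == '"') = true :=
      fun x hx => hq x (by simp [hx])
    have ht : ∀ x ∈ t, (x.2 == '\'' || x.2 == '"') = true :=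
      fun x hx => hrest x (mem_of_findClose h x hx)
    have hfold : ((p, ch) :: rest).foldl stepA (false, none, none) =
        t.foldl stepA (false, none, none) := by
      rw [List.foldl_cons, hstep, foldl_stepA_open rest p ch hrest, h]
    have hm : matchQs ((p, ch) :: rest) = matchQs t := by
      rw [matchQs.eq_def]
      split <;> (try split) <;> simp_all
    rw [hfold, hm]
    exact ih ht
  | case3 p ch rest h =>
    have hc : (ch == '\'' || ch == '"') = true := hq (p, ch) (by simp)
    have hrest : ∀ x ∈ rest, (x.2 == '\'' || x.2 == '"') = true :=
      fun x hx => hq x (by simp [hx])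
    have hm : matchQs ((p, ch) :: rest) = some p := by
      rw [matchQs.eq_def]
      split <;> (try split) <;> simp_all
    have hfold : ((p, ch) :: rest).foldl stepA (false, none, none) =
        (true, some ch, some p) := by
      rw [List.foldl_cons]
      rw [show stepA (false, none, none) (p, ch) = (true, some ch, some p) by simp [stepA, hc]]
      rw [foldl_stepA_open rest p ch hrest, h]
    constructor
    · intro hn; rw [hm] at hn; exact absurd hn (by simp)
    · intro q hq'
      rw [hm] at hq'
      injection hq' with hpq
      subst hpq
      exact ⟨ch, hfold⟩

-- ===== VERDICT (by name: the statement is the Claim_ definition above) =====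
theorem unterminatedstring_spec : Claim_equal_unterminatedstring := by
  intro s _
  unfold Spec_unterminatedstring unterminatedstring unterminatedstring_alt
  have hq : ∀ x ∈ (PySem.List.enumerate s.toList 0).filter
      (fun ic => ic.2 == '\'' || ic.2 == '"'),
      (x.2 == '\'' || x.2 == '"') = true := fun x hx => (List.mem_filter.mp hx).2
  have hchar := foldl_stepA_matchQs _ hq
  rw [foldl_stepA_filter]
  cases hm : matchQs ((PySem.List.enumerate s.toList 0).filter
      (fun ic => ic.2 == '\'' || ic.2 == '"')) with
  | none => rw [hchar.1 hm]; simp [hm]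
  | some p => obtain ⟨ch, hf⟩ := hchar.2 p hm; rw [hf]; simp [hm]
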